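-- pv_equiv track=rewrite | github.com/illyanyc/alpha-paca | crypto/web.py | _format_strategy_signals
-- ===== SOURCE A (Python) =====
-- def _format_strategy_signals(raw: dict) -> dict:
--     """Compact strategy signals for the dashboard."""
--     out = {}
--     for pair, strats in raw.items():
--         buys = [s["name"] for s in strats if isinstance(s, dict) and s.get("signal") == "buy"]
--         sells = [s["name"] for s in strats if isinstance(s, dict) and s.get("signal") == "sell"]
--         if buys or sells:
--             out[pair] = {"buy": buys, "sell": sells}
--     return out
-- ===== SOURCE B (Python) =====
-- def _format_strategy_signals(raw: dict) -> dict: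
--     """Compact strategy signals for the dashboard.
--
--     Different decomposition: instead of building per-pair buy/sell lists with
--     two comprehensions and gating on emptiness, stream every strategy entry
--     through one flattened dispatch and route each name into a lazily created
--     per-pair bucket (setdefault).  A pair appears in the output exactly when
--     its bucket was ever created, so no emptiness guard or per-pair
--     accumulators exist at all; output order is the order of first
--     qualifying hit, which coincides with the pairs' order.
--     """
--     out = {}
--     for pair, strats in raw.items():
--         for s in strats:
--             if isinstance(s, dict):
--                 sig = s.get("signal")
--                 if sig == "buy" or sig == "sell":
--                     out.setdefault(pair, {"buy": [], "sell": []})[sig].append(s["name"])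
--     return out
-- ===== Notes on version B (the rewrite author's own statement) =====
-- stated objective: alternative
-- what changed: Replaces per-pair filtering (two comprehensions plus an emptiness guard) by a flattened streaming pass that routes each qualifying entry's name into a lazily created per-pair {'buy':[], 'sell':[]} bucket via setdefault, so no per-pair accumulators or emptiness test exist; Pre_ excludes inputs where both programs raise KeyError (signal buy/sell without a name key) and association lists with duplicate pair keys, which no Python dict can represent.
import Mathlib
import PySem

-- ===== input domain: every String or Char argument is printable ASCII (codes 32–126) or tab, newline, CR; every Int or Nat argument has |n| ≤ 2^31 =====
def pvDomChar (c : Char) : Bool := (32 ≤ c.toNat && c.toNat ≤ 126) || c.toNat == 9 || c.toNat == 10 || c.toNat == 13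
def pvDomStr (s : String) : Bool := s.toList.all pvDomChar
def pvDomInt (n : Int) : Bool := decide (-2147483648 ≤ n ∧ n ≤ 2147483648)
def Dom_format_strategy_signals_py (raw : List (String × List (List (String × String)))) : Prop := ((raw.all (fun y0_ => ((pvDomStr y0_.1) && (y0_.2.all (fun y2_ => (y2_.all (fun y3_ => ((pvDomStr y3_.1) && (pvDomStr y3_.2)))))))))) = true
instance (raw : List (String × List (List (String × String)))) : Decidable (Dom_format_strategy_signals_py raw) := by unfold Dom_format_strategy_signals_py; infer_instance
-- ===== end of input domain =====

-- B streams every strategy entry once into lazily created per-pair buckets (setdefault) instead of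
-- A's per-pair comprehensions with an emptiness guard; same cost class ("alternative").

-- ===== PORT A =====
-- s.get("signal"): first-match lookup on the strategy dict
def pvSig (s : List (String × String)) : Option String := (PySem.Dict.mk s).get? "signal"
-- s["name"]: raises KeyError when missing; Pre_ excludes that, '.getD ""' only fills the excluded case
def pvName (s : List (String × String)) : String := ((PySem.Dict.mk s).get? "name").getD ""

def format_strategy_signals_py (raw : List (String × List (List (String × String)))) : List (String × List (String × List String)) :=
  (raw.foldl (fun out p =>
      let buys := (p.2.filter (fun s => pvSig s == some "buy")).map pvName
      let sells := (p.2.filter (fun s => pvSig s == some "sell")).map pvName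
      if buys ≠ [] ∨ sells ≠ [] then out.insert p.1 [("buy", buys), ("sell", sells)] else out)
    (PySem.Dict.empty)).items

-- ===== PORT B =====
-- out.setdefault(pair, {"buy": [], "sell": []})[sig].append(s["name"]) is Dict.modify with the
-- fresh bucket as default; the inner append is a first-match update of the 2-entry bucket, exact
-- because the bucket always contains both keys.
def pvAltStep (pair : String) (out : PySem.Dict String (List (String × List String)))
    (s : List (String × String)) : PySem.Dict String (List (String × List String)) :=
  let sig := pvSig s
  if sig == some "buy" ∨ sig == some "sell" then
    let key := if sig == some "buy" then "buy" else "sell"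
    out.modify pair [("buy", []), ("sell", [])]
      (fun cur => cur.map (fun e => if e.1 == key then (e.1, e.2 ++ [pvName s]) else e))
  else out

def format_strategy_signals_py_alt (raw : List (String × List (List (String × String)))) : List (String × List (String × List String)) :=
  (raw.foldl (fun out p => p.2.foldl (pvAltStep p.1) out) (PySem.Dict.empty)).items

-- ===== PRECONDITION & SPEC =====
-- Pre_ excludes (a) exactly the inputs on which BOTH Pythons raise KeyError — a strategy dict whose
-- "signal" is "buy"/"sell" but which has no "name" key — and (b) association lists with duplicate
-- pair keys, which represent no Python dict (a Python dict's keys are always distinct).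
def Pre_format_strategy_signals_py (raw : List (String × List (List (String × String)))) : Prop :=
  (raw.map (·.1)).Nodup ∧
  ∀ p ∈ raw, ∀ s ∈ p.2,
    (pvSig s = some "buy" ∨ pvSig s = some "sell") → (PySem.Dict.mk s).get? "name" ≠ none
instance (raw : List (String × List (List (String × String)))) : Decidable (Pre_format_strategy_signals_py raw) := by unfold Pre_format_strategy_signals_py; infer_instance

def pvWitness_format_strategy_signals_py : (List (String × List (List (String × String)))) :=
  [("BTC", [[("name", "x"), ("signal", "buy")], [("name", "y"), ("signal", "sell")], [("name", "z")]]), ("ETH", [])]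

def Spec_format_strategy_signals_py (raw : List (String × List (List (String × String)))) (out : List (String × List (String × List String))) : Prop := out = format_strategy_signals_py_alt raw
instance (raw : List (String × List (List (String × String)))) (out : List (String × List (String × List String))) : Decidable (Spec_format_strategy_signals_py raw out) := by unfold Spec_format_strategy_signals_py; infer_instance

-- ===== CLAIM =====
def Claim_equal_format_strategy_signals_py : Prop := ∀ (raw : List (String × List (List (String × String)))), Dom_format_strategy_signals_py raw → Pre_format_strategy_signals_py raw → Spec_format_strategy_signals_py raw (format_strategy_signals_py raw)

-- ===== LEMMAS AND PROOFS =====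

-- abbreviations for A's per-pair lists
def pvBuys (l : List (List (String × String))) : List String :=
  (l.filter (fun s => pvSig s == some "buy")).map pvName
def pvSells (l : List (List (String × String))) : List String :=
  (l.filter (fun s => pvSig s == some "sell")).map pvName

-- inner fold once the bucket exists: names are appended into the existing bucket
theorem pvAlt_inner_present (l : List (List (String × String))) (pair : String)
    (d : PySem.Dict String (List (String × List String))) (b0 s0 : List String) :
    l.foldl (pvAltStep pair) (d.insert pair [("buy", b0), ("sell", s0)]) =
      d.insert pair [("buy", b0 ++ pvBuys l), ("sell", s0 ++ pvSells l)] := by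
  induction l generalizing b0 s0 with
  | nil => simp [pvBuys, pvSells]
  | cons x xs ih =>
      simp only [List.foldl_cons]
      by_cases hb : pvSig x = some "buy"
      · have hstep : pvAltStep pair (d.insert pair [("buy", b0), ("sell", s0)]) x =
            d.insert pair [("buy", b0 ++ [pvName x]), ("sell", s0)] := by
          simp [pvAltStep, hb, PySem.Dict.modify, PySem.Dict.getD_insert_self,
            PySem.Dict.insert_insert_self]
        rw [hstep, ih (b0 ++ [pvName x]) s0]
        simp [pvBuys, pvSells, hb]
      · by_cases hs : pvSig x = some "sell"
        · have hstep : pvAltStep pair (d.insert pair [("buy", b0), ("sell", s0)]) x =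
              d.insert pair [("buy", b0), ("sell", s0 ++ [pvName x])] := by
            simp [pvAltStep, hs, PySem.Dict.modify, PySem.Dict.getD_insert_self,
              PySem.Dict.insert_insert_self]
          rw [hstep, ih b0 (s0 ++ [pvName x])]
          simp [pvBuys, pvSells, hs]
        · have hstep : pvAltStep pair (d.insert pair [("buy", b0), ("sell", s0)]) x =
              d.insert pair [("buy", b0), ("sell", s0)] := by
            simp [pvAltStep, hb, hs]
          rw [hstep, ih b0 s0]
          simp [pvBuys, pvSells, hb, hs]

-- inner fold, bucket absent at the start: the result is exactly A's per-pair step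
theorem pvAlt_inner_absent (l : List (List (String × String))) (pair : String)
    (out : PySem.Dict String (List (String × List String)))
    (h : out.get? pair = none) :
    l.foldl (pvAltStep pair) out =
      (if pvBuys l ≠ [] ∨ pvSells l ≠ [] then
        out.insert pair [("buy", pvBuys l), ("sell", pvSells l)] else out) := by
  induction l with
  | nil => simp [pvBuys, pvSells]
  | cons x xs ih =>
      simp only [List.foldl_cons]
      by_cases hb : pvSig x = some "buy"
      · have hstep : pvAltStep pair out x =
            out.insert pair [("buy", [pvName x]), ("sell", [])] := by
          simp [pvAltStep, hb, PySem.Dict.modify, PySem.Dict.getD_eq_get?_getD, h]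
        rw [hstep, pvAlt_inner_present xs pair out [pvName x] []]
        simp [pvBuys, pvSells, hb]
      · by_cases hs : pvSig x = some "sell"
        · have hstep : pvAltStep pair out x =
              out.insert pair [("buy", []), ("sell", [pvName x])] := by
            simp [pvAltStep, hs, PySem.Dict.modify, PySem.Dict.getD_eq_get?_getD, h]
          rw [hstep, pvAlt_inner_present xs pair out [] [pvName x]]
          simp [pvBuys, pvSells, hs]
        · have hstep : pvAltStep pair out x = out := by
            simp [pvAltStep, hb, hs]
          rw [hstep, ih]
          simp [pvBuys, pvSells, hb, hs]

-- the two outer folds agree while every remaining pair key is still absent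
theorem pv_outer_eq (raw : List (String × List (List (String × String))))
    (out : PySem.Dict String (List (String × List String)))
    (hk : (raw.map (·.1)).Nodup)
    (h0 : ∀ p ∈ raw, out.get? p.1 = none) :
    raw.foldl (fun out p =>
      let buys := (p.2.filter (fun s => pvSig s == some "buy")).map pvName
      let sells := (p.2.filter (fun s => pvSig s == some "sell")).map pvName
      if buys ≠ [] ∨ sells ≠ [] then out.insert p.1 [("buy", buys), ("sell", sells)] else out) out =
    raw.foldl (fun out p => p.2.foldl (pvAltStep p.1) out) out := by
  induction raw generalizing out with
  | nil => rfl
  | cons p rest ih =>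
      simp only [List.foldl_cons]
      rw [pvAlt_inner_absent p.2 p.1 out (h0 p List.mem_cons_self)]
      have hne : ∀ q ∈ rest, q.1 ≠ p.1 := by
        intro q hq
        simp only [List.map_cons, List.nodup_cons] at hk
        intro he
        exact hk.1 (he ▸ List.mem_map_of_mem hq)
      have hk' : (rest.map (·.1)).Nodup := by
        simp only [List.map_cons, List.nodup_cons] at hk; exact hk.2
      have hinv : ∀ q ∈ rest,
          (if pvBuys p.2 ≠ [] ∨ pvSells p.2 ≠ [] then
            out.insert p.1 [("buy", pvBuys p.2), ("sell", pvSells p.2)] else out).get? q.1 = none := by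
        intro q hq
        by_cases hcond : pvBuys p.2 ≠ [] ∨ pvSells p.2 ≠ []
        · rw [if_pos hcond, PySem.Dict.get?_insert, if_neg (hne q hq)]
          exact h0 q (List.mem_cons_of_mem _ hq)
        · rw [if_neg hcond]
          exact h0 q (List.mem_cons_of_mem _ hq)
      exact ih _ hk' hinv

-- ===== VERDICT =====
theorem format_strategy_signals_py_spec : Claim_equal_format_strategy_signals_py := by
  intro raw _ hpre
  unfold Spec_format_strategy_signals_py format_strategy_signals_py format_strategy_signals_py_alt
  rw [pv_outer_eq raw PySem.Dict.empty hpre.1 (fun p _ => PySem.Dict.get?_empty _)]
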